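-- pv_equiv track=rewrite | github.com/anagabssss/PROJECTE-SUBHASTA | INFORMATICA/REPASOTODO.py | compta_lletres
-- ===== SOURCE A (Python) =====
-- def compta_lletres(diccionari,lletra):
--     """
--     cream una funcio que donat un diccionari i una lletra,retorni el numero de cops que surt la letra a
--     tot el diccionari, es a dir, tant a les claus com als valors
--     >>> compta_lletre({"clau":"valor},"o")
--     1
--     """
--     comptador=0
--     for clau,valor in diccionari.items():
--         for caracter in clau:
--             if caracter==lletra:
--                 comptador+=1
--         for caracter in valor:
--             if caracter ==lletra:
--                 comptador+=1
--     return comptador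
-- ===== SOURCE B (Python) =====
-- from bisect import bisect_left, bisect_right
--
--
-- def compta_lletres(diccionari, lletra):
--     chars = sorted(c for clau, valor in diccionari.items() for s in (clau, valor) for c in s)
--     return bisect_right(chars, lletra) - bisect_left(chars, lletra)
-- ===== Notes on version B (the rewrite author's own statement) =====
-- stated objective: alternative
-- what changed: Replaces the equality-gated counter over nested per-character loops with sort-then-binary-search: flatten all key/value characters into one list, sort it, and return bisect_right - bisect_left of the letter (the width of its run in the sorted list).
import Mathlib
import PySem

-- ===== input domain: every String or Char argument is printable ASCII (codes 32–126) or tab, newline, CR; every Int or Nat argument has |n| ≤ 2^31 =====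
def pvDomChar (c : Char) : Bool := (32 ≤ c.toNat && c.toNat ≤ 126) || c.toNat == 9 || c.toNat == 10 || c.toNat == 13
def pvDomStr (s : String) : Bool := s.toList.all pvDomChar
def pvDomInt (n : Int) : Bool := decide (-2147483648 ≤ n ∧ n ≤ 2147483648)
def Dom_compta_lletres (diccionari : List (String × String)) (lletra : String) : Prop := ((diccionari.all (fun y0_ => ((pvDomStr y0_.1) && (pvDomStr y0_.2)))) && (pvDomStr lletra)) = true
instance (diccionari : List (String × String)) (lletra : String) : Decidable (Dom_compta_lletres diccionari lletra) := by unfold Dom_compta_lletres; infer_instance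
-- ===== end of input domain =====

-- Header: B flattens all key/value characters, sorts them, and returns bisect_right - bisect_left
-- of the letter (the width of its run in the sorted list) instead of an equality-gated counter;
-- alternative algorithm, same result.

-- ===== PORT A =====
def compta_lletres (diccionari : List (String × String)) (lletra : String) : Int :=
  diccionari.foldl (fun comptador p =>
    let c1 := p.1.toList.foldl (fun acc c => if String.ofList [c] == lletra then acc + 1 else acc) comptador
    p.2.toList.foldl (fun acc c => if String.ofList [c] == lletra then acc + 1 else acc) c1) 0

-- ===== PORT B =====
def compta_lletres_alt (diccionari : List (String × String)) (lletra : String) : Int :=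
  let chars := PySem.List.sorted
    (diccionari.flatMap (fun p => (p.1.toList ++ p.2.toList).map (fun c => String.ofList [c])))
    (fun x => x)
  (PySem.List.bisectRight chars lletra : Int) - (PySem.List.bisectLeft chars lletra : Int)

-- ===== PRECONDITION & SPEC =====
def Spec_compta_lletres (diccionari : List (String × String)) (lletra : String) (out : Int) : Prop := out = compta_lletres_alt diccionari lletra
instance (diccionari : List (String × String)) (lletra : String) (out : Int) : Decidable (Spec_compta_lletres diccionari lletra out) := by unfold Spec_compta_lletres; infer_instance

-- ===== CLAIM (what is proved, stated in full; the proofs are below) =====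
def Claim_equal_compta_lletres : Prop := ∀ (diccionari : List (String × String)) (lletra : String), Dom_compta_lletres diccionari lletra → Spec_compta_lletres diccionari lletra (compta_lletres diccionari lletra)

-- ===== LEMMAS AND PROOFS =====

-- monotone access in a Pairwise-(≤) list
theorem pv_mono (xs : List String) (h : List.Pairwise (· ≤ ·) xs) (i j : Nat)
    (hij : i ≤ j) (hj : j < xs.length) : xs[i]'(lt_of_le_of_lt hij hj) ≤ xs[j] := by
  rcases Nat.lt_or_ge i j with hlt | hge
  · exact List.pairwise_iff_getElem.mp h i j _ hj hlt
  · have : i = j := le_antisymm hij hge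
    subst this; exact le_refl _

-- invariant of CPython's bisect_left loop on a sorted list of Strings
-- (PySem.List.bisectLeftLoop_spec exists only for Int; this is its String analogue)
theorem pv_bisectLeftLoop_spec (xs : List String) (x : String)
    (hs : List.Pairwise (· ≤ ·) xs) :
    ∀ (fuel lo hi : Nat), lo ≤ hi → hi ≤ xs.length → hi - lo ≤ fuel →
      (∀ (j : Nat) (hj : j < xs.length), j < lo → xs[j] < x) →
      (∀ (j : Nat) (hj : j < xs.length), hi ≤ j → x ≤ xs[j]) →
      lo ≤ PySem.List.bisectLeftLoop xs x fuel lo hi ∧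
      PySem.List.bisectLeftLoop xs x fuel lo hi ≤ hi ∧
      (∀ (j : Nat) (hj : j < xs.length), j < PySem.List.bisectLeftLoop xs x fuel lo hi → xs[j] < x) ∧
      (∀ (j : Nat) (hj : j < xs.length), PySem.List.bisectLeftLoop xs x fuel lo hi ≤ j → x ≤ xs[j]) := by
  intro fuel
  induction fuel with
  | zero =>
    intro lo hi hlh hhl hf h1 h2
    have he : lo = hi := by omega
    have e : PySem.List.bisectLeftLoop xs x 0 lo hi = lo := by
      simp [PySem.List.bisectLeftLoop]
    rw [e]
    exact ⟨le_refl _, hlh, h1, fun j hj hle => h2 j hj (by omega)⟩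
  | succ fuel ih =>
    intro lo hi hlh hhl hf h1 h2
    by_cases hcase : lo < hi
    · have hmid : (lo + hi) / 2 < xs.length := by omega
      have hget : xs[(lo + hi) / 2]? = some (xs[(lo + hi) / 2]'hmid) :=
        List.getElem?_eq_getElem hmid
      have e : PySem.List.bisectLeftLoop xs x (fuel + 1) lo hi =
          if xs[(lo + hi) / 2]'hmid < x
          then PySem.List.bisectLeftLoop xs x fuel ((lo + hi) / 2 + 1) hi
          else PySem.List.bisectLeftLoop xs x fuel lo ((lo + hi) / 2) := by
        simp [PySem.List.bisectLeftLoop, hcase, hget]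
      rw [e]
      by_cases hy : xs[(lo + hi) / 2]'hmid < x
      · rw [if_pos hy]
        have h1' : ∀ (j : Nat) (hj : j < xs.length), j < (lo + hi) / 2 + 1 → xs[j] < x := by
          intro j hj hjlt
          exact lt_of_le_of_lt (pv_mono xs hs j ((lo + hi) / 2) (by omega) hmid) hy
        have := ih ((lo + hi) / 2 + 1) hi (by omega) hhl (by omega) h1' h2
        exact ⟨by omega, this.2.1, this.2.2.1, this.2.2.2⟩
      · rw [if_neg hy]
        have hx : x ≤ xs[(lo + hi) / 2]'hmid := le_of_not_gt hy
        have h2' : ∀ (j : Nat) (hj : j < xs.length), (lo + hi) / 2 ≤ j → x ≤ xs[j] := by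
          intro j hj hjle
          exact le_trans hx (pv_mono xs hs ((lo + hi) / 2) j hjle hj)
        have := ih lo ((lo + hi) / 2) (by omega) (by omega) (by omega) h1 h2'
        exact ⟨this.1, by omega, this.2.2.1, this.2.2.2⟩
    · have he : lo = hi := by omega
      have e : PySem.List.bisectLeftLoop xs x (fuel + 1) lo hi = lo := by
        simp [PySem.List.bisectLeftLoop, hcase]
      rw [e]
      exact ⟨le_refl _, hlh, h1, fun j hj hle => h2 j hj (by omega)⟩

-- invariant of CPython's bisect_right loop on a sorted list of Strings
theorem pv_bisectRightLoop_spec (xs : List String) (x : String)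
    (hs : List.Pairwise (· ≤ ·) xs) :
    ∀ (fuel lo hi : Nat), lo ≤ hi → hi ≤ xs.length → hi - lo ≤ fuel →
      (∀ (j : Nat) (hj : j < xs.length), j < lo → xs[j] ≤ x) →
      (∀ (j : Nat) (hj : j < xs.length), hi ≤ j → x < xs[j]) →
      lo ≤ PySem.List.bisectRightLoop xs x fuel lo hi ∧
      PySem.List.bisectRightLoop xs x fuel lo hi ≤ hi ∧
      (∀ (j : Nat) (hj : j < xs.length), j < PySem.List.bisectRightLoop xs x fuel lo hi → xs[j] ≤ x) ∧
      (∀ (j : Nat) (hj : j < xs.length), PySem.List.bisectRightLoop xs x fuel lo hi ≤ j → x < xs[j]) := by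
  intro fuel
  induction fuel with
  | zero =>
    intro lo hi hlh hhl hf h1 h2
    have e : PySem.List.bisectRightLoop xs x 0 lo hi = lo := by
      simp [PySem.List.bisectRightLoop]
    rw [e]
    exact ⟨le_refl _, hlh, h1, fun j hj hle => h2 j hj (by omega)⟩
  | succ fuel ih =>
    intro lo hi hlh hhl hf h1 h2
    by_cases hcase : lo < hi
    · have hmid : (lo + hi) / 2 < xs.length := by omega
      have hget : xs[(lo + hi) / 2]? = some (xs[(lo + hi) / 2]'hmid) :=
        List.getElem?_eq_getElem hmid
      have e : PySem.List.bisectRightLoop xs x (fuel + 1) lo hi =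
          if x < xs[(lo + hi) / 2]'hmid
          then PySem.List.bisectRightLoop xs x fuel lo ((lo + hi) / 2)
          else PySem.List.bisectRightLoop xs x fuel ((lo + hi) / 2 + 1) hi := by
        simp [PySem.List.bisectRightLoop, hcase, hget]
      rw [e]
      by_cases hy : x < xs[(lo + hi) / 2]'hmid
      · rw [if_pos hy]
        have h2' : ∀ (j : Nat) (hj : j < xs.length), (lo + hi) / 2 ≤ j → x < xs[j] := by
          intro j hj hjle
          exact lt_of_lt_of_le hy (pv_mono xs hs ((lo + hi) / 2) j hjle hj)
        have := ih lo ((lo + hi) / 2) (by omega) (by omega) (by omega) h1 h2'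
        exact ⟨this.1, by omega, this.2.2.1, this.2.2.2⟩
      · rw [if_neg hy]
        have hx : xs[(lo + hi) / 2]'hmid ≤ x := le_of_not_gt hy
        have h1' : ∀ (j : Nat) (hj : j < xs.length), j < (lo + hi) / 2 + 1 → xs[j] ≤ x := by
          intro j hj hjlt
          exact le_trans (pv_mono xs hs j ((lo + hi) / 2) (by omega) hmid) hx
        have := ih ((lo + hi) / 2 + 1) hi (by omega) hhl (by omega) h1' h2
        exact ⟨by omega, this.2.1, this.2.2.1, this.2.2.2⟩
    · have e : PySem.List.bisectRightLoop xs x (fuel + 1) lo hi = lo := by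
        simp [PySem.List.bisectRightLoop, hcase]
      rw [e]
      exact ⟨le_refl _, hlh, h1, fun j hj hle => h2 j hj (by omega)⟩

theorem pv_bisectLeft_spec (xs : List String) (x : String)
    (hs : List.Pairwise (· ≤ ·) xs) :
    PySem.List.bisectLeft xs x ≤ xs.length ∧
    (∀ (j : Nat) (hj : j < xs.length), j < PySem.List.bisectLeft xs x → xs[j] < x) ∧
    (∀ (j : Nat) (hj : j < xs.length), PySem.List.bisectLeft xs x ≤ j → x ≤ xs[j]) := by
  have := pv_bisectLeftLoop_spec xs x hs xs.length 0 xs.length (Nat.zero_le _)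
    (le_refl _) (by omega) (by intro j hj h; omega) (by intro j hj h; omega)
  exact ⟨this.2.1, this.2.2.1, this.2.2.2⟩

theorem pv_bisectRight_spec (xs : List String) (x : String)
    (hs : List.Pairwise (· ≤ ·) xs) :
    PySem.List.bisectRight xs x ≤ xs.length ∧
    (∀ (j : Nat) (hj : j < xs.length), j < PySem.List.bisectRight xs x → xs[j] ≤ x) ∧
    (∀ (j : Nat) (hj : j < xs.length), PySem.List.bisectRight xs x ≤ j → x < xs[j]) := by
  have := pv_bisectRightLoop_spec xs x hs xs.length 0 xs.length (Nat.zero_le _)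
    (le_refl _) (by omega) (by intro j hj h; omega) (by intro j hj h; omega)
  exact ⟨this.2.1, this.2.2.1, this.2.2.2⟩

-- on a sorted list, bisect_right - bisect_left is the number of occurrences
theorem pv_run_count (xs : List String) (x : String)
    (hs : List.Pairwise (· ≤ ·) xs) :
    (PySem.List.bisectRight xs x : Int) - (PySem.List.bisectLeft xs x : Int)
      = (xs.count x : Int) := by
  obtain ⟨hLlen, hL1, hL2⟩ := pv_bisectLeft_spec xs x hs
  obtain ⟨hRlen, hR1, hR2⟩ := pv_bisectRight_spec xs x hs
  set L := PySem.List.bisectLeft xs x with hLdef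
  set R := PySem.List.bisectRight xs x with hRdef
  have hLR : L ≤ R := by
    by_contra hcon
    have hRL : R < L := by omega
    have hRlt : R < xs.length := by omega
    exact absurd (hL1 R hRlt hRL) (not_lt.mpr (le_of_lt (hR2 R hRlt (le_refl _))))
  have hcount : xs.count x = R - L := by
    have hsplit : xs = xs.take L ++ ((xs.drop L).take (R - L) ++ (xs.drop L).drop (R - L)) := by
      rw [List.take_append_drop, List.take_append_drop]
    have h1 : (xs.take L).count x = 0 := by
      rw [List.count_eq_zero]
      intro hmem
      obtain ⟨j, hj, hje⟩ := List.mem_iff_getElem.mp hmem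
      have hj2 : j < L ∧ j < xs.length := by simp only [List.length_take] at hj; omega
      have e : (xs.take L)[j]'hj = xs[j]'hj2.2 := List.getElem_take
      rw [e] at hje
      exact absurd hje (ne_of_lt (hL1 j hj2.2 hj2.1))
    have h3 : ((xs.drop L).drop (R - L)).count x = 0 := by
      have hK : L + (R - L) = R := by omega
      rw [List.drop_drop, hK, List.count_eq_zero]
      intro hmem
      obtain ⟨j, hj, hje⟩ := List.mem_iff_getElem.mp hmem
      have hjlen : R + j < xs.length := by simp only [List.length_drop] at hj; omega
      have e : (xs.drop R)[j]'hj = xs[R + j]'hjlen := List.getElem_drop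
      rw [e] at hje
      exact absurd hje.symm (ne_of_lt (hR2 _ hjlen (by omega)))
    have hlen : ((xs.drop L).take (R - L)).length = R - L := by
      simp only [List.length_take, List.length_drop]; omega
    have h2 : ((xs.drop L).take (R - L)).count x = R - L := by
      have hall : ∀ b ∈ (xs.drop L).take (R - L), x = b := by
        intro b hb
        obtain ⟨j, hj, hje⟩ := List.mem_iff_getElem.mp hb
        have hj2 : j < R - L := by simp only [List.length_take, List.length_drop] at hj; omega
        have hjd : j < (xs.drop L).length := by simp only [List.length_drop]; omega
        have hjlen : L + j < xs.length := by omega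
        have e1 : ((xs.drop L).take (R - L))[j]'hj = (xs.drop L)[j]'hjd := List.getElem_take
        have e2 : (xs.drop L)[j]'hjd = xs[L + j]'hjlen := List.getElem_drop
        rw [← hje, e1, e2]
        exact le_antisymm (hL2 _ hjlen (by omega)) (hR1 _ hjlen (by omega))
      calc ((xs.drop L).take (R - L)).count x
          = ((xs.drop L).take (R - L)).length := List.count_eq_length.mpr hall
        _ = R - L := hlen
    calc xs.count x
        = (xs.take L ++ ((xs.drop L).take (R - L) ++ (xs.drop L).drop (R - L))).count x := by
          rw [← hsplit]
      _ = (xs.take L).count x + (((xs.drop L).take (R - L)).count x + ((xs.drop L).drop (R - L)).count x) := by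
          rw [List.count_append, List.count_append]
      _ = R - L := by rw [h1, h2, h3]; omega
  rw [hcount]
  push_cast [Nat.cast_sub hLR]
  ring

-- A's per-string loop counts lletra in the single-char-string image of the string
theorem pvA_inner (xs : List Char) (lletra : String) (a : Int) :
    xs.foldl (fun acc c => if String.ofList [c] == lletra then acc + 1 else acc) a
      = a + ((xs.map (fun c => String.ofList [c])).count lletra : Int) := by
  induction xs generalizing a with
  | nil => simp
  | cons c cs ih =>
    simp only [List.foldl_cons, List.map_cons, List.count_cons]
    rw [ih]
    by_cases h : (String.ofList [c] == lletra) = true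
    · simp only [if_pos h]; push_cast; ring
    · simp only [if_neg h]; push_cast; ring

-- A's double loop is the occurrence count of lletra in the flattened character list
theorem pvA_eq_count (diccionari : List (String × String)) (lletra : String) (a : Int) :
    diccionari.foldl (fun comptador p =>
      let c1 := p.1.toList.foldl (fun acc c => if String.ofList [c] == lletra then acc + 1 else acc) comptador
      p.2.toList.foldl (fun acc c => if String.ofList [c] == lletra then acc + 1 else acc) c1) a
    = a + ((diccionari.flatMap (fun p => (p.1.toList ++ p.2.toList).map (fun c => String.ofList [c]))).count lletra : Int) := by
  induction diccionari generalizing a with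
  | nil => simp
  | cons p rest ih =>
    simp only [List.foldl_cons, List.flatMap_cons, List.count_append]
    rw [ih, pvA_inner, pvA_inner]
    simp only [List.map_append, List.count_append]
    push_cast
    ring

-- ===== VERDICT (by name: the statement is the Claim_ definition above) =====
theorem compta_lletres_spec : Claim_equal_compta_lletres := by
  intro diccionari lletra _
  unfold Spec_compta_lletres compta_lletres compta_lletres_alt
  set chars := diccionari.flatMap (fun p => (p.1.toList ++ p.2.toList).map (fun c => String.ofList [c])) with hchars
  have hpair : List.Pairwise (· ≤ ·) (PySem.List.sorted chars (fun x => x)) :=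
    PySem.List.sorted_pairwise chars (fun x => x)
  have hperm : (PySem.List.sorted chars (fun x => x)).Perm chars :=
    PySem.List.sorted_perm chars (fun x => x) false
  rw [pvA_eq_count, pv_run_count _ _ hpair, hperm.count_eq]
  ring
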